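-- pv_equiv track=rewrite | github.com/BrelLibrary/brel | brel/contexts/factory.py | get_catalog_filepath
-- ===== SOURCE A (Python) =====
-- from typing import Optional
--
-- CATALOG_FILEPATH = "META-INF/catalog.xml"
--
-- def get_catalog_filepath(filepaths: list[str]) -> Optional[str]:
--     """
--     Get the catalog tree.
--     """
--     catalog_filepaths = [
--         filepath for filepath in filepaths if filepath.endswith(CATALOG_FILEPATH)
--     ]
--
--     if not catalog_filepaths:
--         return None
--
--     # Longer names mean deeper into the directory substructure, and we want it to be at surface-level
--     catalog_filepaths.sort(key=lambda name: len(name))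
--     return catalog_filepaths[0]
-- ===== SOURCE B (Python) =====
-- from typing import Optional
--
-- CATALOG_FILEPATH = "META-INF/catalog.xml"
--
-- def get_catalog_filepath(filepaths: list[str]) -> Optional[str]:
--     """
--     Get the catalog tree.
--     """
--     best = None
--     for filepath in filepaths:
--         if filepath.endswith(CATALOG_FILEPATH) and (best is None or len(filepath) < len(best)):
--             best = filepath
--     return best
-- ===== Notes on version B (the rewrite author's own statement) =====
-- stated objective: simpler
-- what changed: Replaces building a filtered list, sorting it by length and taking index 0 with a single pass keeping a running shortest match (strict < keeps the first of equal-length matches, like the stable sort).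
import Mathlib
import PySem

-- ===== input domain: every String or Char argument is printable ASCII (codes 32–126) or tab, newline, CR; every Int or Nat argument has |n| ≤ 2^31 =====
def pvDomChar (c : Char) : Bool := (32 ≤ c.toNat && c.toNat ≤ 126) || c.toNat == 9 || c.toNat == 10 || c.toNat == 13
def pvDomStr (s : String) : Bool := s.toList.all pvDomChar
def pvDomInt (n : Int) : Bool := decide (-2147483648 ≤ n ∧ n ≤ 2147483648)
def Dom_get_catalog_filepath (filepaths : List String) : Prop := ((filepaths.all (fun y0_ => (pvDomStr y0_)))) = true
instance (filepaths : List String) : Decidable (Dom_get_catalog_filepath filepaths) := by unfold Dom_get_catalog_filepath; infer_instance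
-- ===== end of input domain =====

-- B replaces filter+sort-by-length+[0] with a single pass keeping the running shortest match (simpler).


-- ===== PORT A =====
def pvCatalogPath : String := "META-INF/catalog.xml"

def get_catalog_filepath (filepaths : List String) : Option String :=
  let catalog_filepaths := filepaths.filter (fun filepath => PySem.Str.endswith filepath pvCatalogPath)
  if catalog_filepaths = [] then none
  else PySem.List.pyGet? (PySem.List.sorted catalog_filepaths (fun name => PySem.Str.len name) false) 0


-- ===== PORT B =====
def get_catalog_filepath_alt (filepaths : List String) : Option String :=
  filepaths.foldl (fun best filepath =>
    if PySem.Str.endswith filepath pvCatalogPath &&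
        (match best with
         | none => true
         | some b => decide (PySem.Str.len filepath < PySem.Str.len b))
    then some filepath else best) none


-- ===== PRECONDITION & SPEC =====
def Spec_get_catalog_filepath (filepaths : List String) (out : Option String) : Prop := out = get_catalog_filepath_alt filepaths
instance (filepaths : List String) (out : Option String) : Decidable (Spec_get_catalog_filepath filepaths out) := by unfold Spec_get_catalog_filepath; infer_instance

-- ===== CLAIM (what is proved, stated in full; the proofs are below) =====
def Claim_equal_get_catalog_filepath : Prop := ∀ (filepaths : List String), Dom_get_catalog_filepath filepaths → Spec_get_catalog_filepath filepaths (get_catalog_filepath filepaths)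

-- ===== LEMMAS AND PROOFS =====
-- the running-minimum step (strict <: first of equal-length matches wins)
def pvMinStep (best : Option String) (x : String) : Option String :=
  match best with
  | none => some x
  | some b => if PySem.Str.len x < PySem.Str.len b then some x else best

-- B's fold over the whole list equals the min-fold over the filtered list
theorem pv_fold_filter (l : List String) (best : Option String) :
    l.foldl (fun best filepath =>
      if PySem.Str.endswith filepath pvCatalogPath &&
          (match best with
           | none => true
           | some b => decide (PySem.Str.len filepath < PySem.Str.len b))
      then some filepath else best) best
    = (l.filter (fun fp => PySem.Str.endswith fp pvCatalogPath)).foldl pvMinStep best := by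
  induction l generalizing best with
  | nil => rfl
  | cons x xs ih =>
    rw [List.foldl_cons, ih]
    by_cases hp : PySem.Str.endswith x pvCatalogPath
    · have hf : List.filter (fun fp => PySem.Str.endswith fp pvCatalogPath) (x :: xs)
          = x :: List.filter (fun fp => PySem.Str.endswith fp pvCatalogPath) xs := by
        simp only [List.filter_cons, hp, if_true]
      rw [hf, List.foldl_cons]
      congr 1
      cases best with
      | none => simp only [hp, Bool.true_and, if_true, pvMinStep]
      | some b =>
        by_cases hlb : PySem.Str.len x < PySem.Str.len b <;>
          simp only [hp, Bool.true_and, decide_eq_true_eq, hlb, if_true, if_false, pvMinStep,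
            reduceIte, reduceCtorEq]
    · have hp' : PySem.Str.endswith x pvCatalogPath = false := by
        simpa using hp
      have hf : List.filter (fun fp => PySem.Str.endswith fp pvCatalogPath) (x :: xs)
          = List.filter (fun fp => PySem.Str.endswith fp pvCatalogPath) xs := by
        simp only [List.filter_cons, hp', Bool.false_eq_true, if_false]
      rw [hf]
      congr 1
      simp only [hp', Bool.false_and, Bool.false_eq_true, if_false]

theorem pv_head_insertBy (x : String) (acc : List String) :
    (PySem.List.insertBy (fun a b => decide (PySem.Str.len a < PySem.Str.len b)) x acc).head?
    = pvMinStep acc.head? x := by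
  cases acc with
  | nil => rfl
  | cons y ys =>
    by_cases h : x.length < y.length <;>
      simp [PySem.List.insertBy, pvMinStep, h]

theorem pv_head_sort_fold (l : List String) (acc : List String) :
    (l.foldl (fun a x => PySem.List.insertBy (fun a b => decide (PySem.Str.len a < PySem.Str.len b)) x a) acc).head?
    = l.foldl pvMinStep acc.head? := by
  induction l generalizing acc with
  | nil => rfl
  | cons x xs ih =>
    rw [List.foldl_cons, List.foldl_cons, ih, pv_head_insertBy]

-- ===== VERDICT (by name: the statement is the Claim_ definition above) =====
theorem get_catalog_filepath_spec : Claim_equal_get_catalog_filepath := by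
  intro filepaths _
  unfold Spec_get_catalog_filepath get_catalog_filepath get_catalog_filepath_alt
  rw [pv_fold_filter]
  by_cases h : filepaths.filter (fun fp => PySem.Str.endswith fp pvCatalogPath) = []
  · rw [if_pos h, h]; rfl
  · rw [if_neg h, PySem.List.pyGet?_zero, ← List.head?_eq_getElem?]
    rw [show PySem.List.sorted
          (filepaths.filter (fun filepath => PySem.Str.endswith filepath pvCatalogPath))
          (fun name => PySem.Str.len name) false
        = (filepaths.filter (fun filepath => PySem.Str.endswith filepath pvCatalogPath)).foldl
            (fun a x => PySem.List.insertBy (fun a b => decide (PySem.Str.len a < PySem.Str.len b)) x a) []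
        from rfl]
    rw [pv_head_sort_fold]
    rfl
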